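-- pv_equiv track=rewrite | github.com/pypi-data/pypi-mirror-71 | packages/cgm-3d-cnn/cgm_3d_cnn-0.0.2-py3-none-any.whl/rotations.py | rotate_box
-- ===== SOURCE A (Python) =====
-- def rotate_box(pre_box, axis, rot_num = 0, box_size = 9): #box size is the number of bins
--   """ rotates box along one axis rot_num times """
--
--   box_size -= 1 # with 9 bins, indices are 0-8
--   dict = {"x":[1, 2], "y":[0, 2], "z":[0, 1]} # lists the axes to be changed if rotated around key
--   new_pre_box = []
--
--   for ind_set in pre_box:
--     a_1, a_2 = dict[axis][0], dict[axis][1]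
--     ind_1, ind_2 = ind_set[a_1], ind_set[a_2]
--     new_set = ind_set.copy()
--
--     if rot_num == 1:
--       new_set[a_1] = box_size - ind_2
--       new_set[a_2] = ind_1
--
--     if rot_num == 2:
--       new_set[a_1] = box_size - ind_1
--       new_set[a_2] = box_size - ind_2
--
--     if rot_num == 3:
--       new_set[a_1] = ind_2
--       new_set[a_2] = box_size - ind_1
--
--     new_pre_box.append(new_set)
--
--
--   return new_pre_box
-- ===== SOURCE B (Python) =====
-- def rotate_box(pre_box, axis, rot_num=0, box_size=9):
--     """rotates box along one axis rot_num times"""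
--     a1, a2 = {"x": (1, 2), "y": (0, 2), "z": (0, 1)}[axis]
--     m = box_size - 1
--     new_pre_box = []
--     for ind_set in pre_box:
--         t = ind_set.copy()
--         if rot_num in (1, 2, 3):
--             for _ in range(rot_num):
--                 t[a1], t[a2] = m - t[a2], t[a1]
--         new_pre_box.append(t)
--     return new_pre_box
-- ===== Notes on version B (the rewrite author's own statement) =====
-- stated objective: simpler
-- what changed: B replaces A's three-case lookup table of rotation formulas by iterating the single elementary 90-degree rotation (t[a1], t[a2] = m - t[a2], t[a1]) rot_num times when rot_num is 1, 2 or 3.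
-- outside the precondition, e.g. on rotate_box([], '', 0, 0): A returns [], B raises KeyError
import Mathlib
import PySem

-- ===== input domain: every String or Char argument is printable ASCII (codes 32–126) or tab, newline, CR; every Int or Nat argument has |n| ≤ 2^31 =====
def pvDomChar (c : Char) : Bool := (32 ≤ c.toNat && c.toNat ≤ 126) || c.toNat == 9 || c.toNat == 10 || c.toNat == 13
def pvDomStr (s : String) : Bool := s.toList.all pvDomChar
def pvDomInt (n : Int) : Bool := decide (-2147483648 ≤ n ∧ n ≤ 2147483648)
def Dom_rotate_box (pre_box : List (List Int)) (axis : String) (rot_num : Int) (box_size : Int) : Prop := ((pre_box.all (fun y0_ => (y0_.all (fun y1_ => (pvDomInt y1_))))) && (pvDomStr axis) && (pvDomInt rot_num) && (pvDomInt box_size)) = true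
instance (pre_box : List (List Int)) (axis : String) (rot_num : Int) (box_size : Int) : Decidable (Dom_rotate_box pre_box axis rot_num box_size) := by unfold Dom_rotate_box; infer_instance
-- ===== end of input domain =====

-- B replaces A's three-case lookup table by iterating the single elementary 90° rotation rot_num
-- times (objective: simpler); equivalence is about the return value (neither mutates its input).

-- ===== PORT A =====
def rotate_box (pre_box : List (List Int)) (axis : String) (rot_num : Int) (box_size : Int) : List (List Int) :=
  let bs := box_size - 1
  let d : PySem.Dict String (List Int) :=
    PySem.Dict.ofList [("x", [1, 2]), ("y", [0, 2]), ("z", [0, 1])]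
  pre_box.foldl (fun new_pre_box ind_set =>
    -- dict[axis][0/1], ind_set[a_i]: KeyError/IndexError excluded by Pre_, so getD defaults unreached
    let axes := (d.get? axis).getD []
    let a1 := PySem.List.pyGetD axes 0 0
    let a2 := PySem.List.pyGetD axes 1 0
    let i1 := PySem.List.pyGetD ind_set a1 0
    let i2 := PySem.List.pyGetD ind_set a2 0
    let ns := ind_set
    let ns := if rot_num = 1 then PySem.List.pySetD (PySem.List.pySetD ns a1 (bs - i2)) a2 i1 else ns
    let ns := if rot_num = 2 then PySem.List.pySetD (PySem.List.pySetD ns a1 (bs - i1)) a2 (bs - i2) else ns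
    let ns := if rot_num = 3 then PySem.List.pySetD (PySem.List.pySetD ns a1 i2) a2 (bs - i1) else ns
    new_pre_box ++ [ns]) []

-- ===== PORT B =====
-- one elementary 90° rotation: t[a1], t[a2] = m - t[a2], t[a1]
def pvRotStep (m a1 a2 : Int) (t : List Int) : List Int :=
  let p := PySem.List.pyGetD t a1 0
  let q := PySem.List.pyGetD t a2 0
  PySem.List.pySetD (PySem.List.pySetD t a1 (m - q)) a2 p

def rotate_box_alt (pre_box : List (List Int)) (axis : String) (rot_num : Int) (box_size : Int) : List (List Int) :=
  let d : PySem.Dict String (Int × Int) :=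
    PySem.Dict.ofList [("x", (1, 2)), ("y", (0, 2)), ("z", (0, 1))]
  let a := (d.get? axis).getD (0, 0)   -- KeyError excluded by Pre_
  let m := box_size - 1
  pre_box.map (fun t =>
    if rot_num = 1 ∨ rot_num = 2 ∨ rot_num = 3 then
      (List.range rot_num.toNat).foldl (fun t _ => pvRotStep m a.1 a.2 t) t
    else t)

-- ===== PRECONDITION & SPEC =====
-- Pre_ excludes the inputs where A raises — an axis outside {"x","y","z"} (KeyError) and rows too
-- short (IndexError) — plus the corner of an invalid axis with an empty pre_box, where A returns []
-- only because its loop body (and hence the dict lookup) never runs while B looks the axis up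
-- eagerly and raises KeyError; neither behaviour is the specified one there.
-- Detail: an axis outside {"x","y","z"} (KeyError inside the loop) and
-- rows too short for the two looked-up indices (IndexError; axis "z" touches indices 0,1 so
-- length ≥ 2 suffices, "x"/"y" touch index 2 so length ≥ 3 is needed).
def Pre_rotate_box (pre_box : List (List Int)) (axis : String) (rot_num : Int) (box_size : Int) : Prop :=
  (axis = "x" ∨ axis = "y" ∨ axis = "z") ∧
  ∀ row ∈ pre_box, (if axis = "z" then 2 else 3) ≤ row.length

instance (pre_box : List (List Int)) (axis : String) (rot_num : Int) (box_size : Int) : Decidable (Pre_rotate_box pre_box axis rot_num box_size) := by unfold Pre_rotate_box; infer_instance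

def pvWitness_rotate_box : List (List Int) × String × Int × Int := ([[1, 2, 3], [0, 5, 8]], "y", 1, 9)

def Spec_rotate_box (pre_box : List (List Int)) (axis : String) (rot_num : Int) (box_size : Int) (out : List (List Int)) : Prop := out = rotate_box_alt pre_box axis rot_num box_size
instance (pre_box : List (List Int)) (axis : String) (rot_num : Int) (box_size : Int) (out : List (List Int)) : Decidable (Spec_rotate_box pre_box axis rot_num box_size out) := by unfold Spec_rotate_box; infer_instance

-- ===== CLAIM (what is proved, stated in full; the proofs are below) =====
def Claim_equal_rotate_box : Prop := ∀ (pre_box : List (List Int)) (axis : String) (rot_num : Int) (box_size : Int), Dom_rotate_box pre_box axis rot_num box_size → Pre_rotate_box pre_box axis rot_num box_size → Spec_rotate_box pre_box axis rot_num box_size (rotate_box pre_box axis rot_num box_size)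


-- ===== LEMMAS AND PROOFS =====

-- A's loop body appended one result per row: the fold is the map of the body
theorem pv_foldl_eq_map {α β : Type} (g f : α → β) (xs : List α) (h : ∀ x ∈ xs, g x = f x) :
    ∀ acc : List β, xs.foldl (fun a x => a ++ [g x]) acc = acc ++ xs.map f := by
  induction xs with
  | nil => intro acc; simp
  | cons x xs ih =>
    intro acc
    simp only [List.foldl_cons, List.map_cons]
    rw [ih (fun y hy => h y (List.mem_cons_of_mem x hy)), h x List.mem_cons_self]
    simp

-- one elementary rotation on a destructured row, for each pair of affected indices
theorem pv_step12 (bs x y z : Int) (r : List Int) :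
    pvRotStep bs 1 2 (x :: y :: z :: r) = x :: (bs - z) :: y :: r := by
  simp [pvRotStep, pysem]

theorem pv_step02 (bs x y z : Int) (r : List Int) :
    pvRotStep bs 0 2 (x :: y :: z :: r) = (bs - z) :: y :: x :: r := by
  simp [pvRotStep, pysem]

theorem pv_step01 (bs x y : Int) (r : List Int) :
    pvRotStep bs 0 1 (x :: y :: r) = (bs - y) :: x :: r := by
  simp [pvRotStep, pysem]

-- per-row agreement of A's three-case table with B's iterated step, one lemma per index pair
set_option maxHeartbeats 1600000 in
theorem pv_row12 (bs rot_num x y z : Int) (r : List Int) :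
    (let row := x :: y :: z :: r
     let i1 := PySem.List.pyGetD row 1 0
     let i2 := PySem.List.pyGetD row 2 0
     let ns := row
     let ns := if rot_num = 1 then PySem.List.pySetD (PySem.List.pySetD ns 1 (bs - i2)) 2 i1 else ns
     let ns := if rot_num = 2 then PySem.List.pySetD (PySem.List.pySetD ns 1 (bs - i1)) 2 (bs - i2) else ns
     let ns := if rot_num = 3 then PySem.List.pySetD (PySem.List.pySetD ns 1 i2) 2 (bs - i1) else ns
     ns) =
    (if rot_num = 1 ∨ rot_num = 2 ∨ rot_num = 3 then
      (List.range rot_num.toNat).foldl (fun t _ => pvRotStep bs 1 2 t) (x :: y :: z :: r)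
    else x :: y :: z :: r) := by
  by_cases h1 : rot_num = 1
  · subst h1
    rw [show List.range (1:Int).toNat = [0] from rfl]
    simp only [List.foldl_cons, List.foldl_nil]
    rw [pv_step12]
    norm_num
    simp [pysem]
  · by_cases h2 : rot_num = 2
    · subst h2
      rw [show List.range (2:Int).toNat = [0, 1] from rfl]
      simp only [List.foldl_cons, List.foldl_nil]
      rw [pv_step12, pv_step12]
      norm_num
      simp [pysem]
    · by_cases h3 : rot_num = 3
      · subst h3
        rw [show List.range (3:Int).toNat = [0, 1, 2] from rfl]
        simp only [List.foldl_cons, List.foldl_nil]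
        rw [pv_step12, pv_step12, pv_step12]
        norm_num
        simp [pysem]
      · simp [h1, h2, h3]

set_option maxHeartbeats 1600000 in
theorem pv_row02 (bs rot_num x y z : Int) (r : List Int) :
    (let row := x :: y :: z :: r
     let i1 := PySem.List.pyGetD row 0 0
     let i2 := PySem.List.pyGetD row 2 0
     let ns := row
     let ns := if rot_num = 1 then PySem.List.pySetD (PySem.List.pySetD ns 0 (bs - i2)) 2 i1 else ns
     let ns := if rot_num = 2 then PySem.List.pySetD (PySem.List.pySetD ns 0 (bs - i1)) 2 (bs - i2) else ns
     let ns := if rot_num = 3 then PySem.List.pySetD (PySem.List.pySetD ns 0 i2) 2 (bs - i1) else ns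
     ns) =
    (if rot_num = 1 ∨ rot_num = 2 ∨ rot_num = 3 then
      (List.range rot_num.toNat).foldl (fun t _ => pvRotStep bs 0 2 t) (x :: y :: z :: r)
    else x :: y :: z :: r) := by
  by_cases h1 : rot_num = 1
  · subst h1
    rw [show List.range (1:Int).toNat = [0] from rfl]
    simp only [List.foldl_cons, List.foldl_nil]
    rw [pv_step02]
    norm_num
    simp [pysem]
  · by_cases h2 : rot_num = 2
    · subst h2
      rw [show List.range (2:Int).toNat = [0, 1] from rfl]
      simp only [List.foldl_cons, List.foldl_nil]
      rw [pv_step02, pv_step02]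
      norm_num
      simp [pysem]
    · by_cases h3 : rot_num = 3
      · subst h3
        rw [show List.range (3:Int).toNat = [0, 1, 2] from rfl]
        simp only [List.foldl_cons, List.foldl_nil]
        rw [pv_step02, pv_step02, pv_step02]
        norm_num
        simp [pysem]
      · simp [h1, h2, h3]

set_option maxHeartbeats 1600000 in
theorem pv_row01 (bs rot_num x y : Int) (r : List Int) :
    (let row := x :: y :: r
     let i1 := PySem.List.pyGetD row 0 0
     let i2 := PySem.List.pyGetD row 1 0
     let ns := row
     let ns := if rot_num = 1 then PySem.List.pySetD (PySem.List.pySetD ns 0 (bs - i2)) 1 i1 else ns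
     let ns := if rot_num = 2 then PySem.List.pySetD (PySem.List.pySetD ns 0 (bs - i1)) 1 (bs - i2) else ns
     let ns := if rot_num = 3 then PySem.List.pySetD (PySem.List.pySetD ns 0 i2) 1 (bs - i1) else ns
     ns) =
    (if rot_num = 1 ∨ rot_num = 2 ∨ rot_num = 3 then
      (List.range rot_num.toNat).foldl (fun t _ => pvRotStep bs 0 1 t) (x :: y :: r)
    else x :: y :: r) := by
  by_cases h1 : rot_num = 1
  · subst h1
    rw [show List.range (1:Int).toNat = [0] from rfl]
    simp only [List.foldl_cons, List.foldl_nil]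
    rw [pv_step01]
    norm_num
    simp [pysem]
  · by_cases h2 : rot_num = 2
    · subst h2
      rw [show List.range (2:Int).toNat = [0, 1] from rfl]
      simp only [List.foldl_cons, List.foldl_nil]
      rw [pv_step01, pv_step01]
      norm_num
      simp [pysem]
    · by_cases h3 : rot_num = 3
      · subst h3
        rw [show List.range (3:Int).toNat = [0, 1, 2] from rfl]
        simp only [List.foldl_cons, List.foldl_nil]
        rw [pv_step01, pv_step01, pv_step01]
        norm_num
        simp [pysem]
      · simp [h1, h2, h3]

theorem rotate_box_spec : Claim_equal_rotate_box := by
  intro pre_box axis rot_num box_size _ hpre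
  obtain ⟨hax, hlen⟩ := hpre
  unfold Spec_rotate_box rotate_box rotate_box_alt
  rcases hax with rfl | rfl | rfl <;>
    simp only [show (((PySem.Dict.ofList [("x",([1,2]:List Int)),("y",[0,2]),("z",[0,1])]).get? "x").getD []) = [1,2] from by decide,
      show (((PySem.Dict.ofList [("x",([1,2]:List Int)),("y",[0,2]),("z",[0,1])]).get? "y").getD []) = [0,2] from by decide,
      show (((PySem.Dict.ofList [("x",([1,2]:List Int)),("y",[0,2]),("z",[0,1])]).get? "z").getD []) = [0,1] from by decide,
      show (((PySem.Dict.ofList [("x",((1:Int),(2:Int))),("y",(0,2)),("z",(0,1))]).get? "x").getD (0,0)) = (1,2) from by decide,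
      show (((PySem.Dict.ofList [("x",((1:Int),(2:Int))),("y",(0,2)),("z",(0,1))]).get? "y").getD (0,0)) = (0,2) from by decide,
      show (((PySem.Dict.ofList [("x",((1:Int),(2:Int))),("y",(0,2)),("z",(0,1))]).get? "z").getD (0,0)) = (0,1) from by decide,
      show PySem.List.pyGetD ([1,2]:List Int) 0 0 = 1 from by decide,
      show PySem.List.pyGetD ([1,2]:List Int) 1 0 = 2 from by decide,
      show PySem.List.pyGetD ([0,2]:List Int) 0 0 = 0 from by decide,
      show PySem.List.pyGetD ([0,2]:List Int) 1 0 = 2 from by decide,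
      show PySem.List.pyGetD ([0,1]:List Int) 0 0 = 0 from by decide,
      show PySem.List.pyGetD ([0,1]:List Int) 1 0 = 1 from by decide]
  · rw [pv_foldl_eq_map _ _ pre_box ?_ [], List.nil_append]
    intro row hmem
    have hl := hlen row hmem
    simp only [if_neg (by decide : ¬("x" = "z"))] at hl
    obtain ⟨a, b, c, r, rfl⟩ : ∃ a b c r, row = a :: b :: c :: r := by
      match row, hl with
      | a :: b :: c :: r, _ => exact ⟨a, b, c, r, rfl⟩
    exact pv_row12 (box_size - 1) rot_num a b c r
  · rw [pv_foldl_eq_map _ _ pre_box ?_ [], List.nil_append]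
    intro row hmem
    have hl := hlen row hmem
    simp only [if_neg (by decide : ¬("y" = "z"))] at hl
    obtain ⟨a, b, c, r, rfl⟩ : ∃ a b c r, row = a :: b :: c :: r := by
      match row, hl with
      | a :: b :: c :: r, _ => exact ⟨a, b, c, r, rfl⟩
    exact pv_row02 (box_size - 1) rot_num a b c r
  · rw [pv_foldl_eq_map _ _ pre_box ?_ [], List.nil_append]
    intro row hmem
    have hl := hlen row hmem
    obtain ⟨a, b, r, rfl⟩ : ∃ a b r, row = a :: b :: r := by
      match row, hl with
      | a :: b :: r, _ => exact ⟨a, b, r, rfl⟩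
    exact pv_row01 (box_size - 1) rot_num a b r
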